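-- pv_equiv track=rewrite | github.com/DavidVisscher/advent-of-code-2020 | day4/main.py | check_hcl_field
-- ===== SOURCE A (Python) =====
-- from typing import List, Dict, Tuple
--
-- def check_hcl_field(passport: Dict) -> bool:
--     """
--     Checks if hcl field follows the format for a valid color.
--     """
--     hcl = passport["hcl"]
--
--     if len(hcl) != 7:
--         return False
--     if hcl[0] != "#":
--         return False
--
--     valid_chars = ['0','1','2','3','4','5','6','7','8','9','a','b','c','d','e','f']
--
--     for char in hcl[1:]:
--         if char not in valid_chars:
--             return False
--     return True
-- ===== SOURCE B (Python) =====
-- def check_hcl_field(passport):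
--     """
--     Checks if hcl field follows the format for a valid color.
--     Recursive state machine over positions: '#' at 0, lowercase hex at 1..6, end at 7.
--     """
--     def match(s, i):
--         if i == len(s):
--             return i == 7
--         c = s[i]
--         if i == 0:
--             return c == "#" and match(s, 1)
--         return i < 7 and ("0" <= c <= "9" or "a" <= c <= "f") and match(s, i + 1)
--     return match(passport["hcl"], 0)
-- ===== Notes on version B (the rewrite author's own statement) =====
-- stated objective: alternative
-- what changed: Replaces A's upfront length/prefix guards and the for-loop testing membership in a 16-element list by a recursive position-indexed state machine that reads one character per call, uses character-range comparisons instead of list membership, and folds the length check into the end-of-string base case.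
import Mathlib
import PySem

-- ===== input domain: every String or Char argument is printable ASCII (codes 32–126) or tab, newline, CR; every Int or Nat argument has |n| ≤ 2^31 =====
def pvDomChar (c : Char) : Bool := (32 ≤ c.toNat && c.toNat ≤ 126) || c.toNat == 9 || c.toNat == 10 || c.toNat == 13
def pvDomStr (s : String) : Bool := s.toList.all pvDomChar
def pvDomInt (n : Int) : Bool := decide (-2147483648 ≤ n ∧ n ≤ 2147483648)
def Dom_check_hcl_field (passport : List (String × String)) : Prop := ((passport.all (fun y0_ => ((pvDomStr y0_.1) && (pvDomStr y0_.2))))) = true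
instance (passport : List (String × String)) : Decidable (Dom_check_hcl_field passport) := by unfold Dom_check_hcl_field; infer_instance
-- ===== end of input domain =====

-- B replaces A's guard chain and 16-element membership loop by a recursive
-- position-indexed state machine using character-range comparisons.

-- ===== PORT A =====
-- valid_chars = ['0',…,'f']
def pvValidChars : List Char :=
  ['0','1','2','3','4','5','6','7','8','9','a','b','c','d','e','f']

-- 'for char in hcl[1:]: if char not in valid_chars: return False / return True'
def pvCheckLoop : List Char → Bool
  | [] => true
  | c :: rest => if ¬ (pvValidChars.contains c) then false else pvCheckLoop rest

def check_hcl_field (passport : List (String × String)) : Bool :=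
  match passport.lookup "hcl" with
  | none => false   -- KeyError in Python; excluded by Pre_
  | some hcl =>
    if PySem.Str.len hcl ≠ 7 then false
    else if PySem.Str.pyGet? hcl 0 ≠ some '#' then false
    else pvCheckLoop (PySem.Str.slice hcl (some 1) none).toList

-- ===== PORT B =====
-- def match(s, i): …  (recursion advances i by 1; it never passes 7, hence the 8 - i measure)
def pvMatch (s : List Char) (i : Nat) : Bool :=
  if i = s.length then i == 7
  else
    match PySem.List.pyGet? s (i : Int) with
    | none => false   -- IndexError, unreachable from i = 0
    | some c =>
      if i = 0 then (c == '#') && pvMatch s 1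
      else if i < 7 then
        (('0' ≤ c && c ≤ '9') || ('a' ≤ c && c ≤ 'f')) && pvMatch s (i + 1)
      else false
termination_by 8 - i
decreasing_by all_goals omega

def check_hcl_field_alt (passport : List (String × String)) : Bool :=
  match passport.lookup "hcl" with
  | none => false   -- KeyError in Python; excluded by Pre_
  | some hcl => pvMatch hcl.toList 0

-- ===== PRECONDITION & SPEC =====
-- Pre_ excludes passports without an "hcl" key, on which Python A raises KeyError.
def Pre_check_hcl_field (passport : List (String × String)) : Prop :=
  (passport.map (·.1)).contains "hcl" = true
instance (passport : List (String × String)) : Decidable (Pre_check_hcl_field passport) := by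
  unfold Pre_check_hcl_field; infer_instance

def pvWitness_check_hcl_field : (List (String × String)) := [("hcl", "#1a2b3c")]

def Spec_check_hcl_field (passport : List (String × String)) (out : Bool) : Prop := out = check_hcl_field_alt passport
instance (passport : List (String × String)) (out : Bool) : Decidable (Spec_check_hcl_field passport out) := by unfold Spec_check_hcl_field; infer_instance

-- ===== CLAIM (what is proved, stated in full; the proofs are below) =====
def Claim_equal_check_hcl_field : Prop := ∀ (passport : List (String × String)), Dom_check_hcl_field passport → Pre_check_hcl_field passport → Spec_check_hcl_field passport (check_hcl_field passport)

-- ===== LEMMAS AND PROOFS =====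

-- B's range test agrees with A's list membership.
lemma pvHexRange_eq (c : Char) :
    (('0' ≤ c && c ≤ '9') || ('a' ≤ c && c ≤ 'f')) = pvValidChars.contains c := by
  rw [Bool.eq_iff_iff]
  simp only [pvValidChars, List.contains_eq_mem, List.mem_cons, List.not_mem_nil, or_false,
    Bool.or_eq_true, Bool.and_eq_true, decide_eq_true_eq, Char.le_def, Char.ext_iff,
    UInt32.le_iff_toNat_le, UInt32.ext_iff,
    show '0'.val.toNat = 48 from rfl, show '1'.val.toNat = 49 from rfl,
    show '2'.val.toNat = 50 from rfl, show '3'.val.toNat = 51 from rfl,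
    show '4'.val.toNat = 52 from rfl, show '5'.val.toNat = 53 from rfl,
    show '6'.val.toNat = 54 from rfl, show '7'.val.toNat = 55 from rfl,
    show '8'.val.toNat = 56 from rfl, show '9'.val.toNat = 57 from rfl,
    show 'a'.val.toNat = 97 from rfl, show 'b'.val.toNat = 98 from rfl,
    show 'c'.val.toNat = 99 from rfl, show 'd'.val.toNat = 100 from rfl,
    show 'e'.val.toNat = 101 from rfl, show 'f'.val.toNat = 102 from rfl]
  omega

-- from position 1 ≤ i ≤ 7 the machine accepts iff the length is 7 and the rest is hex
lemma pvMatch_char (s : List Char) :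
    ∀ k i, 1 ≤ i → i + k = 7 →
      pvMatch s i = (decide (s.length = 7) && (s.drop i).all (fun c => pvValidChars.contains c)) := by
  intro k
  induction k with
  | zero =>
    intro i _ hk
    have hi : i = 7 := by omega
    subst hi
    rw [pvMatch]
    by_cases hlen : 7 = s.length
    · simp [← hlen, List.drop_eq_nil_of_le]
    · rw [if_neg hlen]
      have h7 : s.length ≠ 7 := fun h => hlen h.symm
      cases PySem.List.pyGet? s ((7 : Nat) : Int) <;> simp [h7]
  | succ k ih =>
    intro i hi hk
    rw [pvMatch]
    by_cases hlen : i = s.length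
    · have : s.length ≠ 7 := by omega
      simp [hlen, this]
    · by_cases hin : i < s.length
      · have hget : PySem.List.pyGet? s (i : Int) = some s[i] := PySem.List.pyGet?_ofNat s i hin
        have hdrop : s.drop i = s[i] :: s.drop (i + 1) := List.drop_eq_getElem_cons hin
        rw [hget]
        simp only [if_neg (by omega : ¬ i = 0), if_pos (by omega : i < 7)]
        rw [ih (i + 1) (by omega) (by omega), pvHexRange_eq, hdrop]
        simp only [List.all_cons]
        cases decide (s.length = 7) <;> cases pvValidChars.contains s[i] <;> simp [hlen]
      · have : PySem.List.pyGet? s (i : Int) = none := by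
          rw [PySem.List.pyGet?_eq_none_iff]
          simp [PySem.Raise.InRange]; omega
        rw [this]
        simp [hlen, show s.length ≠ 7 by omega]

-- A's loop is an all-scan
lemma pvCheckLoop_eq_all (cs : List Char) :
    pvCheckLoop cs = cs.all (fun c => pvValidChars.contains c) := by
  induction cs with
  | nil => rfl
  | cons c rest ih => by_cases h : pvValidChars.contains c <;> simp [pvCheckLoop, ih]

lemma pv_body_eq (hcl : String) :
    (if PySem.Str.len hcl ≠ 7 then false
     else if PySem.Str.pyGet? hcl 0 ≠ some '#' then false
     else pvCheckLoop (PySem.Str.slice hcl (some 1) none).toList)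
    = pvMatch hcl.toList 0 := by
  rw [pvMatch]
  cases hs : hcl.toList with
  | nil => simp [PySem.Str.len, hs]
  | cons c rest =>
    have hget0 : PySem.List.pyGet? (c :: rest) ((0 : Nat) : Int) = some c :=
      PySem.List.pyGet?_ofNat (c :: rest) 0 (Nat.succ_pos _)
    have hlen : PySem.Str.len hcl = ((c :: rest).length : Int) := by simp [PySem.Str.len, hs]
    have hgetA : PySem.Str.pyGet? hcl 0 = some c := by simp [hs]
    have htail : (PySem.Str.slice hcl (some 1) none).toList = rest := by
      simp [PySem.Str.slice, hs, PySem.List.slice_from_one]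
    have h0 : ¬ ((0:Nat) = (c :: rest).length) := by simp
    have hm := pvMatch_char (c :: rest) 6 1 (by omega) (by omega)
    rw [pvCheckLoop_eq_all]
    simp only [hget0, hm, hgetA, htail, hlen, List.drop_succ_cons,
      List.drop_zero, List.length_cons]
    by_cases h7 : rest.length + 1 = 7
    · by_cases hc : c = '#' <;> simp [h7, hc]
    · have h7' : ¬ ((rest.length : Int) + 1 = 7) := by omega
      simp [h7', show ¬ (rest.length + 1 = 7) from h7]

-- ===== VERDICT (by name: the statement is the Claim_ definition above) =====
theorem check_hcl_field_spec : Claim_equal_check_hcl_field := by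
  intro passport _ _
  unfold Spec_check_hcl_field check_hcl_field check_hcl_field_alt
  cases passport.lookup "hcl" with
  | none => rfl
  | some hcl => exact pv_body_eq hcl
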